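-- pv_equiv track=rewrite | github.com/Bheinarl/algorithm_course_in_ss_afy | swea_day5_pb삼성시의버스노선.py | how_many_bus_in_bus_stop
-- ===== SOURCE A (Python) =====
-- def how_many_bus_in_bus_stop(buses, bus_stops):
--
--     bus_counts = []
--     for bus_stop in bus_stops:  # 버스 정류장 번호를 순회하면서
--         counts = 0
--         for bus in buses:  # 버스의 노선 안에 정류장 번호가 있으면 count+1
--             if bus_stop in list(range(bus[0], bus[1]+1)):
--                 counts += 1
--         bus_counts += [counts]  # 한 버스 정류장 번호 스캔 완료하면 리스트에 추가
--
--     return bus_counts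
-- ===== SOURCE B (Python) =====
-- def how_many_bus_in_bus_stop(buses, bus_stops):
--     # Event counting: a bus [a, b] covers stop s iff a <= s and not b <= s-1.
--     # Sort the starts and the ends of the (non-empty) routes once; each stop's
--     # answer is then #(starts <= s) - #(ends <= s-1), found by binary search.
--     starts = sorted(a for a, b in buses if a <= b)
--     ends = sorted(b for a, b in buses if a <= b)
--
--     def bisect_right(arr, x):
--         lo, hi = 0, len(arr)
--         while lo < hi:
--             mid = (lo + hi) // 2
--             if x < arr[mid]:
--                 hi = mid
--             else:
--                 lo = mid + 1
--         return lo
--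
--     return [bisect_right(starts, s) - bisect_right(ends, s - 1) for s in bus_stops]
-- ===== Notes on version B (the rewrite author's own statement) =====
-- stated objective: faster
-- what changed: B sorts the route starts and ends once and answers each stop with two binary searches (#starts<=s minus #ends<s), replacing A's per-stop scan over every bus with a materialised list(range(a,b+1)) membership test.
import Mathlib
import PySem

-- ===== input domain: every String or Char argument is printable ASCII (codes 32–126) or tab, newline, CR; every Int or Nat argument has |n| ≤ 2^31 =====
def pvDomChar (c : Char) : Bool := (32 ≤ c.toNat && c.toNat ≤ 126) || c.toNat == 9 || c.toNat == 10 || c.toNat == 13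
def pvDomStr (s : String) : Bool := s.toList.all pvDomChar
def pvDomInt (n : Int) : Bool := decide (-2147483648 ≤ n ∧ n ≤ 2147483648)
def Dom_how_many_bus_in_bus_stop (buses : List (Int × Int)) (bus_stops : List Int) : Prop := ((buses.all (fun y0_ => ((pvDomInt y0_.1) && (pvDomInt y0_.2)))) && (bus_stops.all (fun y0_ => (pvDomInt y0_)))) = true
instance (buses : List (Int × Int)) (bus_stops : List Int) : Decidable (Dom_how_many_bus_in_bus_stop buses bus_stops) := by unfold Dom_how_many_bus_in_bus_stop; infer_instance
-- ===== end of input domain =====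

-- B sorts the route starts and ends once and answers each stop with two binary
-- searches, replacing A's per-stop per-bus materialised-range membership scan (faster).

-- ===== PORT A =====
def how_many_bus_in_bus_stop (buses : List (Int × Int)) (bus_stops : List Int) : List Int :=
  bus_stops.foldl (fun bus_counts bus_stop =>
    bus_counts ++
      [buses.foldl (fun counts bus =>
          if bus_stop ∈ PySem.List.pyRange bus.1 (bus.2 + 1) 1 then counts + 1 else counts) 0])
    []

-- ===== PORT B =====
-- Source B's hand-written bisect_right is, step for step, the standard bisect_right loop
-- (lo=0, hi=len, mid=(lo+hi)//2, 'if x < arr[mid]: hi=mid else lo=mid+1'), which is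
-- exactly PySem.List.bisectRight; the comprehensions are filter/map/sorted.
def how_many_bus_in_bus_stop_alt (buses : List (Int × Int)) (bus_stops : List Int) : List Int :=
  let routes := buses.filter (fun p => decide (p.1 ≤ p.2))
  let starts := PySem.List.sorted (routes.map Prod.fst) (fun x => x) false
  let ends := PySem.List.sorted (routes.map Prod.snd) (fun x => x) false
  bus_stops.map (fun s =>
    ((PySem.List.bisectRight starts s : Nat) : Int) - ((PySem.List.bisectRight ends (s - 1) : Nat) : Int))

-- ===== PRECONDITION & SPEC =====
def Spec_how_many_bus_in_bus_stop (buses : List (Int × Int)) (bus_stops : List Int) (out : List Int) : Prop := out = how_many_bus_in_bus_stop_alt buses bus_stops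
instance (buses : List (Int × Int)) (bus_stops : List Int) (out : List Int) : Decidable (Spec_how_many_bus_in_bus_stop buses bus_stops out) := by unfold Spec_how_many_bus_in_bus_stop; infer_instance

-- ===== CLAIM (what is proved, stated in full; the proofs are below) =====
def Claim_equal_how_many_bus_in_bus_stop : Prop := ∀ (buses : List (Int × Int)) (bus_stops : List Int), Dom_how_many_bus_in_bus_stop buses bus_stops → Spec_how_many_bus_in_bus_stop buses bus_stops (how_many_bus_in_bus_stop buses bus_stops)

-- ===== LEMMAS AND PROOFS =====

-- On a sorted list, bisect_right counts the elements ≤ x.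
theorem pv_bisectRight_countP (xs : List Int) (x : Int)
    (h : xs.Pairwise (fun a b => a ≤ b)) :
    PySem.List.bisectRight xs x = xs.countP (fun v => decide (v ≤ x)) := by
  obtain ⟨hle, hlt, hgt⟩ := PySem.List.bisectRight_spec xs x h
  set k := PySem.List.bisectRight xs x with hk
  have hsplit : xs.countP (fun v => decide (v ≤ x))
      = (xs.take k).countP (fun v => decide (v ≤ x)) + (xs.drop k).countP (fun v => decide (v ≤ x)) := by
    rw [← List.countP_append, List.take_append_drop]
  have h1 : (xs.take k).countP (fun v => decide (v ≤ x)) = (xs.take k).length := by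
    apply List.countP_eq_length.mpr
    intro v hv
    obtain ⟨i, hi, rfl⟩ := List.mem_iff_getElem.mp hv
    have hik : i < k := by
      have := hi; rw [List.length_take] at this; omega
    have hil : i < xs.length := lt_of_lt_of_le hik hle
    rw [List.getElem_take]
    exact decide_eq_true (hlt i hil hik)
  have h2 : (xs.drop k).countP (fun v => decide (v ≤ x)) = 0 := by
    apply List.countP_eq_zero.mpr
    intro v hv
    obtain ⟨i, hi, rfl⟩ := List.mem_iff_getElem.mp hv
    have hil : k + i < xs.length := by
      have := hi; rw [List.length_drop] at this; omega
    rw [List.getElem_drop]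
    simp only [decide_eq_true_eq, not_le]
    exact hgt (k + i) hil (Nat.le_add_right k i)
  rw [hsplit, h1, h2, List.length_take]
  omega

-- Pointwise count identity on routes with p.1 ≤ p.2.
theorem pv_count_split (l : List (Int × Int)) (s : Int)
    (h : ∀ p ∈ l, p.1 ≤ p.2) :
    l.countP (fun p => decide (p.1 ≤ s ∧ s ≤ p.2)) + l.countP (fun p => decide (p.2 ≤ s - 1))
      = l.countP (fun p => decide (p.1 ≤ s)) := by
  induction l with
  | nil => simp
  | cons p t ih =>
    have hp := h p List.mem_cons_self
    have ht := ih (fun q hq => h q (List.mem_cons_of_mem p hq))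
    simp only [List.countP_cons, decide_eq_true_eq]
    split_ifs <;> omega

-- A's membership test in list(range(a, b+1)) is the interval test a ≤ s ≤ b.
theorem pv_mem_range_iff (a b s : Int) :
    (s ∈ PySem.List.pyRange a (b + 1) 1) ↔ (a ≤ s ∧ s ≤ b) := by
  rw [PySem.List.mem_pyRange_one]
  omega

-- A's inner loop counts the buses whose interval contains s.
theorem pv_inner_count (buses : List (Int × Int)) (s : Int) (c : Int) :
    buses.foldl (fun counts bus =>
        if s ∈ PySem.List.pyRange bus.1 (bus.2 + 1) 1 then counts + 1 else counts) c
      = c + ((buses.countP (fun p => decide (p.1 ≤ s ∧ s ≤ p.2)) : Nat) : Int) := by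
  induction buses generalizing c with
  | nil => simp
  | cons p t ih =>
    rw [List.foldl_cons]
    by_cases h : p.1 ≤ s ∧ s ≤ p.2
    · rw [if_pos ((pv_mem_range_iff _ _ _).mpr h), ih]
      simp [h]
      omega
    · rw [if_neg (fun hc => h ((pv_mem_range_iff _ _ _).mp hc)), ih]
      simp [h]

-- Buses with empty routes never contain s.
theorem pv_count_filter (buses : List (Int × Int)) (s : Int) :
    buses.countP (fun p => decide (p.1 ≤ s ∧ s ≤ p.2))
      = (buses.filter (fun p => decide (p.1 ≤ p.2))).countP (fun p => decide (p.1 ≤ s ∧ s ≤ p.2)) := by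
  induction buses with
  | nil => rfl
  | cons p t ih =>
    by_cases hq : p.1 ≤ p.2
    · rw [List.filter_cons_of_pos (by simpa using hq), List.countP_cons, List.countP_cons, ih]
    · rw [List.filter_cons_of_neg (by simpa using hq), List.countP_cons, ih]
      have hnp : (decide (p.1 ≤ s ∧ s ≤ p.2) : Bool) = false := by
        simp only [decide_eq_false_iff_not]
        omega
      rw [hnp]
      simp

-- Per-stop agreement: A's count equals B's two binary searches.
theorem pv_per_stop (buses : List (Int × Int)) (s : Int) :
    ((buses.countP (fun p => decide (p.1 ≤ s ∧ s ≤ p.2)) : Nat) : Int)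
      = ((PySem.List.bisectRight
            (PySem.List.sorted ((buses.filter (fun p => decide (p.1 ≤ p.2))).map Prod.fst) (fun x => x) false) s : Nat) : Int)
        - ((PySem.List.bisectRight
            (PySem.List.sorted ((buses.filter (fun p => decide (p.1 ≤ p.2))).map Prod.snd) (fun x => x) false) (s - 1) : Nat) : Int) := by
  set F := buses.filter (fun p => decide (p.1 ≤ p.2)) with hF
  have hall : ∀ p ∈ F, p.1 ≤ p.2 := by
    intro p hp
    have := List.of_mem_filter hp
    simpa using this
  have hs1 : PySem.List.bisectRight (PySem.List.sorted (F.map Prod.fst) (fun x => x) false) s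
      = F.countP (fun p => decide (p.1 ≤ s)) := by
    rw [pv_bisectRight_countP _ _ (by simpa using PySem.List.sorted_pairwise (F.map Prod.fst) (fun x => x))]
    rw [(PySem.List.sorted_perm (F.map Prod.fst) (fun x => x) false).countP_eq]
    simp [List.countP_map, Function.comp_def]
  have hs2 : PySem.List.bisectRight (PySem.List.sorted (F.map Prod.snd) (fun x => x) false) (s - 1)
      = F.countP (fun p => decide (p.2 ≤ s - 1)) := by
    rw [pv_bisectRight_countP _ _ (by simpa using PySem.List.sorted_pairwise (F.map Prod.snd) (fun x => x))]
    rw [(PySem.List.sorted_perm (F.map Prod.snd) (fun x => x) false).countP_eq]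
    simp [List.countP_map, Function.comp_def]
  rw [hs1, hs2, pv_count_filter buses s, ← pv_count_split F s hall]
  push_cast
  ring

-- A's outer foldl with append builds the per-stop map.
theorem pv_outer (buses : List (Int × Int)) (stops : List Int) (acc : List Int) :
    stops.foldl (fun bus_counts bus_stop =>
        bus_counts ++
          [buses.foldl (fun counts bus =>
              if bus_stop ∈ PySem.List.pyRange bus.1 (bus.2 + 1) 1 then counts + 1 else counts) 0]) acc
      = acc ++ stops.map (fun s => ((buses.countP (fun p => decide (p.1 ≤ s ∧ s ≤ p.2)) : Nat) : Int)) := by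
  induction stops generalizing acc with
  | nil => simp
  | cons s t ih =>
    rw [List.foldl_cons, ih, pv_inner_count]
    simp

-- ===== VERDICT (by name: the statement is the Claim_ definition above) =====
theorem how_many_bus_in_bus_stop_spec : Claim_equal_how_many_bus_in_bus_stop := by
  intro buses bus_stops _
  unfold Spec_how_many_bus_in_bus_stop how_many_bus_in_bus_stop how_many_bus_in_bus_stop_alt
  rw [pv_outer buses bus_stops []]
  simp only [List.nil_append]
  exact List.map_congr_left (fun s _ => pv_per_stop buses s)
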